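-- pv_equiv track=rewrite | github.com/ChangxingJiang/OJ-Practice | 1001-1100/1086/1086_Python_1.py | highFive
-- ===== SOURCE A (Python) =====
-- import collections
-- import heapq
-- from typing import List
--
-- def highFive(items: List[List[int]]) -> List[List[int]]:
--     # 统计学生得分
--     count = collections.defaultdict(list)
--     for student, mark in items:
--         heapq.heappush(count[student], mark)
--         if len(count[student]) > 5:
--             heapq.heappop(count[student])
--
--     # 计算学生平均分
--     ans = [[student, sum(lst) // 5] for student, lst in count.items()]
--     ans.sort(key=lambda x: x[0])
--
--     return ans
-- ===== SOURCE B (Python) =====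
-- def highFive(items):
--     marks = {}
--     for student, mark in items:
--         marks.setdefault(student, []).append(mark)
--     return [[s, sum(sorted(marks[s], reverse=True)[:5]) // 5] for s in sorted(marks)]
-- ===== Notes on version B (the rewrite author's own statement) =====
-- stated objective: simpler
-- what changed: A maintains a bounded min-heap of size 5 per student while streaming the items; B just collects every mark per student in a plain dict, then takes sorted(lst, reverse=True)[:5] per student and emits the rows in sorted-key order directly (no post-hoc list sort).
import Mathlib
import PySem

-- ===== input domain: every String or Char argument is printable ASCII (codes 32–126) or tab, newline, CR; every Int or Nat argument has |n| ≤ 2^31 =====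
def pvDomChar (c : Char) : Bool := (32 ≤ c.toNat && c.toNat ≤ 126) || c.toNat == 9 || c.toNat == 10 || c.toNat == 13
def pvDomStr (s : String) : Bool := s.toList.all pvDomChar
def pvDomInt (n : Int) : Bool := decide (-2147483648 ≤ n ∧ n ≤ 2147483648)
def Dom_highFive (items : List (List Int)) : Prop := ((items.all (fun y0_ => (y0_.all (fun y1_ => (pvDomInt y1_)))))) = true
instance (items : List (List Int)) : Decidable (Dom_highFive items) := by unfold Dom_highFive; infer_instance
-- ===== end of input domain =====

-- B replaces A's per-student bounded min-heap by a plain dict of all marks plus a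
-- per-student descending sort; objective: simpler.

-- ===== PORT A =====
-- heapq.heappush / conditional heappop on a ≤5-element int heap: the heap's internal array order
-- is never observed by A (only len and sum are taken), so the heap list is modelled EXACTLY on its
-- multiset as an ascending ordered list: push = ordered insert, pop = drop the head (the minimum).
def pyHeapStep (lst : List Int) (mark : Int) : List Int :=
  let l := PySem.List.insertBy (fun a b => decide (a < b)) mark lst
  if 5 < l.length then l.tail else l

-- one iteration of A's loop: unpack [student, mark], heappush, heappop if len > 5
def pyStepA (d : PySem.Dict Int (List Int)) (it : List Int) : PySem.Dict Int (List Int) :=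
  match it with
  | [student, mark] => d.modify student ([] : List Int) (fun lst => pyHeapStep lst mark)
  | _ => d  -- unreachable arm: Pre_ admits only length-2 rows (Python unpacking raises otherwise)

def highFive (items : List (List Int)) : List (List Int) :=
  -- count = collections.defaultdict(list); for student, mark in items: push, pop if >5
  let count := items.foldl pyStepA PySem.Dict.empty
  let ans := count.items.map (fun p => [p.1, PySem.Int.floordiv p.2.sum 5])
  PySem.List.sorted ans (fun x => PySem.List.pyGetD x 0 0) false  -- ans.sort(key=lambda x: x[0]); x[0] total here (rows have length 2)

-- ===== PORT B =====
-- one iteration of B's loop: marks.setdefault(student, []).append(mark)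
def pyStepB (d : PySem.Dict Int (List Int)) (it : List Int) : PySem.Dict Int (List Int) :=
  match it with
  | [student, mark] => d.modify student ([] : List Int) (fun lst => lst ++ [mark])
  | _ => d  -- unreachable arm under Pre_ (Python unpacking raises ValueError)

def highFive_alt (items : List (List Int)) : List (List Int) :=
  -- marks = {}; for student, mark in items: marks.setdefault(student, []).append(mark)
  let marks := items.foldl pyStepB PySem.Dict.empty
  (PySem.List.sorted marks.keys (fun x => x) false).map (fun s =>
    [s, PySem.Int.floordiv
          (PySem.List.slice (PySem.List.sorted (marks.getD s []) (fun x => x) true) none (some 5)).sum 5])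

-- ===== PRECONDITION & SPEC =====
-- Pre_ excludes only rows that are not [student, mark] pairs: Python's 'for student, mark in items'
-- raises ValueError there (in A and in B alike).
def Pre_highFive (items : List (List Int)) : Prop := ∀ it ∈ items, it.length = 2
instance (items : List (List Int)) : Decidable (Pre_highFive items) := by unfold Pre_highFive; infer_instance

def pvWitness_highFive : List (List Int) :=
  [[1, 91], [2, 93], [1, 92], [2, 99], [2, 98], [2, 97], [2, 60], [2, 100], [1, 60], [1, 60], [1, 60], [1, 60]]

def Spec_highFive (items : List (List Int)) (out : List (List Int)) : Prop := out = highFive_alt items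
instance (items : List (List Int)) (out : List (List Int)) : Decidable (Spec_highFive items out) := by unfold Spec_highFive; infer_instance

-- ===== CLAIM (what is proved, stated in full; the proofs are below) =====
def Claim_equal_highFive : Prop := ∀ (items : List (List Int)), Dom_highFive items → Pre_highFive items → Spec_highFive items (highFive items)

-- ===== LEMMAS AND PROOFS =====

-- the (student, mark) pair a length-2 row denotes
def pvToPair (it : List Int) : Int × Int := (it.getD 0 0, it.getD 1 0)

-- under Pre_, A's fold over rows is the fold of the clean pair body over the pair list
theorem pv_foldl_unpackA (items : List (List Int)) (d0 : PySem.Dict Int (List Int))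
    (h : ∀ it ∈ items, it.length = 2) :
    items.foldl pyStepA d0
      = (items.map pvToPair).foldl (fun d p => d.modify p.1 ([] : List Int) (fun lst => pyHeapStep lst p.2)) d0 := by
  rw [List.foldl_map]
  refine PySem.List.foldl_congr_mem _ _ _ _ ?_
  intro acc it hit
  obtain ⟨a, b, rfl⟩ := List.length_eq_two.mp (h it hit)
  rfl

-- and likewise B's fold
theorem pv_foldl_unpackB (items : List (List Int)) (d0 : PySem.Dict Int (List Int))
    (h : ∀ it ∈ items, it.length = 2) :
    items.foldl pyStepB d0
      = (items.map pvToPair).foldl (fun d p => d.modify p.1 ([] : List Int) (fun lst => lst ++ [p.2])) d0 := by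
  rw [List.foldl_map]
  refine PySem.List.foldl_congr_mem _ _ _ _ ?_
  intro acc it hit
  obtain ⟨a, b, rfl⟩ := List.length_eq_two.mp (h it hit)
  rfl

theorem pv_length_insertBy {α : Type} (before : α → α → Bool) (x : α) (ys : List α) :
    (PySem.List.insertBy before x ys).length = ys.length + 1 := by
  induction ys with
  | nil => rfl
  | cons y t ih =>
    simp only [PySem.List.insertBy]
    split <;> simp [ih]

-- dropping past the inserted element commutes with ordered insertion into a suffix of a sorted list
theorem pv_drop_insertBy (k : Nat) (m : Int) (S : List Int) (hS : S.Pairwise (· ≤ ·)) :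
    (PySem.List.insertBy (fun a b => decide (a < b)) m S).drop (k + 1)
      = (PySem.List.insertBy (fun a b => decide (a < b)) m (S.drop k)).tail := by
  induction k generalizing S with
  | zero => simp
  | succ k ih =>
    cases S with
    | nil => simp [PySem.List.insertBy]
    | cons a rest =>
      rw [List.pairwise_cons] at hS
      simp only [PySem.List.insertBy]
      by_cases hma : m < a
      · simp only [hma, decide_true, if_true, List.drop_succ_cons]
        cases hd : rest.drop k with
        | nil => simp [PySem.List.insertBy]
        | cons b bs =>
          have hb : b ∈ rest := List.drop_subset k rest (hd ▸ List.mem_cons_self)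
          have : m < b := lt_of_lt_of_le hma (hS.1 b hb)
          simp [PySem.List.insertBy, this]
      · simp only [hma, decide_false, List.drop_succ_cons]
        exact ih rest hS.2

-- A's per-student loop state after processing marks ms is the bottom-truncated ascending sort of ms
theorem pv_fold_heap (ms : List Int) :
    ms.foldl pyHeapStep [] =
      (PySem.List.sorted ms (fun x => x) false).drop (ms.length - 5) := by
  induction ms using List.reverseRecOn with
  | nil => rfl
  | append_singleton ms m ih =>
    have hsort : PySem.List.sorted (ms ++ [m]) (fun x : Int => x) false
        = PySem.List.insertBy (fun a b => decide (a < b)) m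
            (PySem.List.sorted ms (fun x => x) false) := by
      rw [PySem.List.sorted_eq_foldl_insertBy, PySem.List.sorted_eq_foldl_insertBy,
        List.foldl_append]
      rfl
    set S := PySem.List.sorted ms (fun x : Int => x) false with hSdef
    have hlen : S.length = ms.length := PySem.List.length_sorted ms _ _
    have hpw : S.Pairwise (· ≤ ·) := PySem.List.sorted_pairwise ms (fun x => x)
    rw [List.foldl_append, List.foldl_cons, List.foldl_nil, ih, hsort]
    show pyHeapStep (S.drop (ms.length - 5)) m = _
    unfold pyHeapStep
    have hdl : (S.drop (ms.length - 5)).length = ms.length - (ms.length - 5) := by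
      simp [hlen]
    by_cases h5 : 5 ≤ ms.length
    · have h6 : 5 < (PySem.List.insertBy (fun a b => decide (a < b)) m (S.drop (ms.length - 5))).length := by
        rw [pv_length_insertBy, hdl]; omega
      rw [if_pos h6]
      have := pv_drop_insertBy (ms.length - 5) m S hpw
      rw [← this]
      congr 1
      simp; omega
    · have h6 : ¬ 5 < (PySem.List.insertBy (fun a b => decide (a < b)) m (S.drop (ms.length - 5))).length := by
        rw [pv_length_insertBy, hdl]; omega
      rw [if_neg h6]
      have h0 : ms.length - 5 = 0 := by omega
      have h0' : ms.length + 1 - 5 = 0 := by omega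
      simp [h0, h0']

-- descending sort of ints is the reverse of the ascending sort
theorem pv_sorted_rev_eq_reverse (ms : List Int) :
    PySem.List.sorted ms (fun x => x) true = (PySem.List.sorted ms (fun x => x) false).reverse := by
  have h : (PySem.List.sorted ms (fun x : Int => x) true).reverse
      = PySem.List.sorted ms (fun x => x) false := by
    apply PySem.List.eq_of_perm_of_pairwise_le_of_injective (fun x : Int => x) (fun _ _ h => h)
    · exact ((List.reverse_perm _).trans (PySem.List.sorted_perm ms _ true)).trans
        (PySem.List.sorted_perm ms _ false).symm
    · exact (List.pairwise_reverse).mpr (PySem.List.sorted_pairwise_rev ms _)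
    · exact PySem.List.sorted_pairwise ms _
  rw [← h, List.reverse_reverse]

-- B's per-student value: sum of the 5 largest = sum of A's truncated ascending list
theorem pv_sum_top5 (ms : List Int) :
    (PySem.List.slice (PySem.List.sorted ms (fun x => x) true) none (some 5)).sum
      = ((PySem.List.sorted ms (fun x => x) false).drop (ms.length - 5)).sum := by
  rw [pv_sorted_rev_eq_reverse]
  set S := PySem.List.sorted ms (fun x : Int => x) false with hSdef
  have hlen : S.length = ms.length := PySem.List.length_sorted ms _ _
  have h5 : PySem.List.slice S.reverse none (some 5) = S.reverse.take 5 := by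
    rw [PySem.List.slice_to _ (by norm_num)]
    rfl
  rw [h5, ← List.sum_reverse (S.reverse.take 5), List.reverse_take, List.reverse_reverse,
    List.length_reverse, hlen]

-- projecting A's dict-building fold onto one key
theorem pv_getD_foldl_modify_heap (l : List (Int × Int)) (d : PySem.Dict Int (List Int)) (c : Int) :
    (l.foldl (fun d p => d.modify p.1 ([] : List Int) (fun lst => pyHeapStep lst p.2)) d).getD c []
      = ((l.filter (fun p => p.1 == c)).map (·.2)).foldl pyHeapStep (d.getD c []) := by
  induction l generalizing d with
  | nil => rfl
  | cons p t ih =>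
    rw [List.foldl_cons, ih]
    by_cases hc : p.1 = c
    · simp [hc, PySem.Dict.getD_modify]
    · have hne : ¬ c = p.1 := fun h => hc h.symm
      simp [hc, PySem.Dict.getD_modify, hne]

-- the common per-student value of both programs
def pvVal (pairs : List (Int × Int)) (c : Int) : Int :=
  PySem.Int.floordiv
    (((pairs.filter (fun p => p.1 == c)).map (·.2)).foldl pyHeapStep []).sum 5

theorem pv_keys_fold (pairs : List (Int × Int)) (f : PySem.Dict Int (List Int) → Int × Int → List Int → List Int) :
    (pairs.foldl (fun d p => d.modify p.1 ([] : List Int) (f d p)) PySem.Dict.empty).keys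
      = PySem.Set.ofList (pairs.map Prod.fst) := by
  rw [PySem.Dict.keys_foldl_modify_key pairs Prod.fst ([] : List Int) f PySem.Dict.empty]
  rw [PySem.Dict.keys_empty, PySem.Set.update_nil_left]

-- ===== VERDICT (by name: the statement is the Claim_ definition above) =====
theorem highFive_spec : Claim_equal_highFive := by
  intro items _hdom hpre
  show highFive items = highFive_alt items
  unfold highFive highFive_alt
  simp only []
  rw [pv_foldl_unpackA items _ hpre, pv_foldl_unpackB items _ hpre]
  set pairs := items.map pvToPair with hpairs
  set dA := pairs.foldl (fun d p => d.modify p.1 ([] : List Int) (fun lst => pyHeapStep lst p.2)) PySem.Dict.empty with hdA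
  set dB := pairs.foldl (fun d p => d.modify p.1 ([] : List Int) (fun lst => lst ++ [p.2])) PySem.Dict.empty with hdB
  have hkA : dA.keys = PySem.Set.ofList (pairs.map Prod.fst) :=
    pv_keys_fold pairs (fun _ p lst => pyHeapStep lst p.2)
  have hkB : dB.keys = PySem.Set.ofList (pairs.map Prod.fst) :=
    pv_keys_fold pairs (fun _ p lst => lst ++ [p.2])
  set K := PySem.Set.ofList (pairs.map Prod.fst) with hK
  have hndA : dA.keys.Nodup := by
    rw [hdA]
    exact PySem.Dict.nodup_keys_foldl_modify_key pairs Prod.fst ([] : List Int)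
      (fun _ p lst => pyHeapStep lst p.2) PySem.Dict.empty (by simp)
  -- A's value at each key
  have hvA : ∀ c : Int, dA.getD c [] =
      ((pairs.filter (fun p => p.1 == c)).map (·.2)).foldl pyHeapStep [] := by
    intro c
    rw [hdA, pv_getD_foldl_modify_heap]
    rfl
  -- B's value at each key
  have hvB : ∀ c : Int, dB.getD c [] = (pairs.filter (fun p => p.1 == c)).map (·.2) := by
    intro c
    rw [hdB, PySem.Dict.getD_foldl_modify_append]
    rfl
  -- A's unsorted answer list
  have hitems : dA.items = K.map (fun c => (c, dA.getD c [])) := by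
    rw [PySem.Dict.items_eq_map_keys dA hndA ([] : List Int), hkA]
  rw [hitems, List.map_map]
  -- the sort of A's answer list is the map over the sorted keys
  have hsortA : PySem.List.sorted (K.map ((fun p : Int × List Int => [p.1, PySem.Int.floordiv p.2.sum 5]) ∘ (fun c => (c, dA.getD c []))))
      (fun x => PySem.List.pyGetD x 0 0) false
      = (PySem.List.sorted K (fun x => x) false).map (fun c => [c, pvVal pairs c]) := by
    apply PySem.List.sorted_eq_of_perm_of_pairwise_lt
    · have hperm : (PySem.List.sorted K (fun x : Int => x) false).Perm K :=
        PySem.List.sorted_perm K _ false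
      have : (PySem.List.sorted K (fun x : Int => x) false).map (fun c => [c, pvVal pairs c])
          |>.Perm (K.map (fun c => [c, pvVal pairs c])) := hperm.map _
      refine this.trans (List.Perm.of_eq ?_)
      apply List.map_congr_left
      intro c _
      simp only [Function.comp, pvVal]
      rw [hvA c]
    · rw [List.pairwise_map]
      have := PySem.List.sorted_ofList_pairwise_lt (pairs.map Prod.fst)
      rw [← hK] at this
      refine this.imp ?_
      intro a b hab
      simpa [PySem.List.pyGetD_zero_cons] using hab
  rw [hsortA, hkB]
  apply List.map_congr_left
  intro c _
  have : pvVal pairs c =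
      PySem.Int.floordiv
        (PySem.List.slice (PySem.List.sorted (dB.getD c []) (fun x => x) true) none (some 5)).sum 5 := by
    rw [hvB c]
    unfold pvVal
    rw [pv_fold_heap, pv_sum_top5]
  rw [this]
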